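-- pv_equiv track=rewrite | github.com/timelessfb/work2 | work3/NonlinearMinimize.py | ZtoX
-- ===== SOURCE A (Python) =====
-- def ZtoX(i, X_map, S, J_num):
--     if i == -1:
--         return -1, -1
--     t = -1
--     for l_x in range(S):
--         for l_y in range(J_num + 1):
--             if X_map[l_x][l_y] == 0:
--                 t += 1
--                 if i == t:
--                     return l_x, l_y
-- ===== SOURCE B (Python) =====
-- def ZtoX(i, X_map, S, J_num):
--     if i == -1:
--         return -1, -1
--     if i < 0:
--         return None
--     remaining = i
--     for x, row in enumerate(X_map[:S]):
--         prefix = row[:J_num + 1]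
--         c = prefix.count(0)
--         if remaining < c:
--             return x, [y for y, v in enumerate(prefix) if v == 0][remaining]
--         remaining -= c
--     return None
-- ===== Notes on version B (the rewrite author's own statement) =====
-- stated objective: alternative
-- what changed: A scans cell by cell with a global zero counter and early exit; B works row-wise: it counts the zeros of each row prefix to skip whole rows, then locates the wanted zero inside the one selected row via its enumerated zero-position list.
-- outside the precondition, e.g. on ZtoX(5, [[0]], 1, 0): A returns None, B returns None; on ZtoX(-2, [[0]], 1, 0): A returns None, B returns None; on ZtoX(0, [[0, 2], [-2, 0]], -1, 0): A returns None, B returns (0, 0)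
import Mathlib
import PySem

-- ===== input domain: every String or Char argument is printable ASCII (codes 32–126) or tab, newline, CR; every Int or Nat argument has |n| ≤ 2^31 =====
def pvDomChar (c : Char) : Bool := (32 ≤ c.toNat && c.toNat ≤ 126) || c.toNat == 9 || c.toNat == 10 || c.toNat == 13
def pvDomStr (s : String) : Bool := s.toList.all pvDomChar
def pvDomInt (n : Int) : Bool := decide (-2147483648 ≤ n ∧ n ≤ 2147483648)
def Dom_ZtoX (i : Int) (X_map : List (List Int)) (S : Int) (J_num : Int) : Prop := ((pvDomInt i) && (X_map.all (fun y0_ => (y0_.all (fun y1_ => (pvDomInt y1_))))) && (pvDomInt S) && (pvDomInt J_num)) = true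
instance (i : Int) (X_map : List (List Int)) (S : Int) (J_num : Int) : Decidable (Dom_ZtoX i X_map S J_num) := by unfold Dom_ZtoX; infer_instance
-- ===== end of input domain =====

-- B replaces A's cell-by-cell scan with a global counter by a row-wise strategy: count the
-- zeros of each row pfx to skip whole rows, then pick the wanted zero from the selected
-- row's enumerated zero-position list (objective: alternative decomposition, same cost).

-- ===== PORT A =====
-- inner loop: for l_y in range(J_num+1), carrying the counter t; early return as Option.
-- Out-of-range access (a Python IndexError, excluded by Pre_ZtoX) reads default 1 here.
def ZtoX_inner (i : Int) (X_map : List (List Int)) (x : Int) (ys : List Int) (t : Int) :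
    Option (Int × Int) × Int :=
  match ys with
  | [] => (none, t)
  | y :: ys' =>
    if PySem.List.pyGetD (PySem.List.pyGetD X_map x []) y 1 = 0 then
      if i = t + 1 then (some (x, y), t + 1)
      else ZtoX_inner i X_map x ys' (t + 1)
    else ZtoX_inner i X_map x ys' t

-- outer loop: for l_x in range(S)
def ZtoX_outer (i : Int) (X_map : List (List Int)) (J_num : Int) (xs : List Int) (t : Int) :
    Option (Int × Int) × Int :=
  match xs with
  | [] => (none, t)
  | x :: xs' =>
    match ZtoX_inner i X_map x (PySem.List.pyRange 0 (J_num + 1) 1) t with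
    | (some p, t') => (some p, t')
    | (none, t') => ZtoX_outer i X_map J_num xs' t'

def ZtoX (i : Int) (X_map : List (List Int)) (S : Int) (J_num : Int) : Int × Int :=
  if i = -1 then (-1, -1)
  else
    match ZtoX_outer i X_map J_num (PySem.List.pyRange 0 S 1) (-1) with
    | (some p, _) => p
    | (none, _) => (0, 0)  -- Python A falls off the loop returning None here; excluded by Pre_ZtoX

-- ===== PORT B =====
-- [y for y, v in enumerate(pfx) if v == 0]
def ZtoX_zeroPos (pfx : List Int) : List Int :=
  (PySem.List.enumerate pfx).filterMap (fun yv => if yv.2 = 0 then some yv.1 else none)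

-- for x, row in enumerate(X_map[:S]): skip a whole row by its zero count, or answer inside it
def ZtoX_altLoop (J_num : Int) (rows : List (Int × List Int)) (remaining : Int) : Int × Int :=
  match rows with
  | [] => (0, 0)  -- Python B returns None here; excluded by Pre_ZtoX
  | (x, row) :: rs =>
    let pfx := PySem.List.slice row none (some (J_num + 1))
    let c : Int := pfx.count 0
    if remaining < c then (x, (PySem.List.pyGet? (ZtoX_zeroPos pfx) remaining).getD 0)
    else ZtoX_altLoop J_num rs (remaining - c)

def ZtoX_alt (i : Int) (X_map : List (List Int)) (S : Int) (J_num : Int) : Int × Int :=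
  if i = -1 then (-1, -1)
  else if i < 0 then (0, 0)  -- Python B returns None here; excluded by Pre_ZtoX
  else ZtoX_altLoop J_num (PySem.List.enumerate (PySem.List.slice X_map none (some S))) i

-- ===== PRECONDITION & SPEC =====
-- zeros of one row that A's scan can count: first J_num+1 entries
def ZtoX_zc (J_num : Int) (row : List Int) : Int := (row.take (J_num + 1).toNat).count 0
-- zeros of the first n rows
def ZtoX_cum (X_map : List (List Int)) (J_num : Int) (n : Nat) : Int :=
  ((X_map.take n).map (ZtoX_zc J_num)).sum

-- Pre_ZtoX is exactly the set of inputs where Python A returns a tuple: i = -1, or the i-th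
-- zero (row-major, 0 ≤ i) is reached in some row x before any out-of-range access; elsewhere
-- A raises IndexError or returns None, which is not a value of the declared type (there B may
-- return its own value, e.g. for negative S, where its end-relative slice still yields rows).
def Pre_ZtoX (i : Int) (X_map : List (List Int)) (S : Int) (J_num : Int) : Prop :=
  i = -1 ∨
    (0 ≤ i ∧ 0 ≤ J_num ∧ ∃ x, x < min S.toNat X_map.length ∧
      (∀ row ∈ X_map.take x, J_num + 1 ≤ (row.length : Int)) ∧
      ZtoX_cum X_map J_num x ≤ i ∧ i < ZtoX_cum X_map J_num (x + 1))
instance (i : Int) (X_map : List (List Int)) (S : Int) (J_num : Int) : Decidable (Pre_ZtoX i X_map S J_num) := by unfold Pre_ZtoX; infer_instance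

def pvWitness_ZtoX : Int × List (List Int) × Int × Int := (1, [[0, 1], [0, 0]], 2, 1)

def Spec_ZtoX (i : Int) (X_map : List (List Int)) (S : Int) (J_num : Int) (out : Int × Int) : Prop := out = ZtoX_alt i X_map S J_num
instance (i : Int) (X_map : List (List Int)) (S : Int) (J_num : Int) (out : Int × Int) : Decidable (Spec_ZtoX i X_map S J_num out) := by unfold Spec_ZtoX; infer_instance

-- ===== CLAIM =====
def Claim_equal_ZtoX : Prop := ∀ (i : Int) (X_map : List (List Int)) (S : Int) (J_num : Int), Dom_ZtoX i X_map S J_num → Pre_ZtoX i X_map S J_num → Spec_ZtoX i X_map S J_num (ZtoX i X_map S J_num)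

-- ===== LEMMAS AND PROOFS =====

-- the zeros contributed by one row, as A's inner loop produces them
def zRow (X_map : List (List Int)) (J_num : Int) (x : Int) : List (Int × Int) :=
  (PySem.List.pyRange 0 (J_num + 1) 1).filterMap (fun y =>
    if PySem.List.pyGetD (PySem.List.pyGetD X_map x []) y 1 = 0 then some (x, y) else none)

-- the zeros of the rows seen by B, as pairs
def altFlat (J_num : Int) (rows : List (Int × List Int)) : List (Int × Int) :=
  match rows with
  | [] => []
  | (x, row) :: rs =>
    ((ZtoX_zeroPos (PySem.List.slice row none (some (J_num + 1)))).map (fun y => (x, y)))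
      ++ altFlat J_num rs

lemma inner_spec (i : Int) (X_map : List (List Int)) (x : Int) :
    ∀ (ys : List Int) (t : Int), t < i →
      ZtoX_inner i X_map x ys t =
        (if i ≤ t + ((ys.filterMap (fun y =>
            if PySem.List.pyGetD (PySem.List.pyGetD X_map x []) y 1 = 0 then some (x, y) else none)).length : Int)
         then ((ys.filterMap (fun y =>
            if PySem.List.pyGetD (PySem.List.pyGetD X_map x []) y 1 = 0 then some (x, y) else none))[(i - t - 1).toNat]?, i)
         else (none, t + ((ys.filterMap (fun y =>
            if PySem.List.pyGetD (PySem.List.pyGetD X_map x []) y 1 = 0 then some (x, y) else none)).length : Int))) := by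
  intro ys
  induction ys with
  | nil =>
    intro t ht
    simp [ZtoX_inner]
    omega
  | cons y ys' ih =>
    intro t ht
    by_cases hz : PySem.List.pyGetD (PySem.List.pyGetD X_map x []) y 1 = 0
    · by_cases hi : i = t + 1
      · rw [ZtoX_inner]
        simp only [hz, if_true, hi, List.filterMap_cons, List.length_cons]
        have h1 : t + 1 ≤ t + (((ys'.filterMap (fun y =>
            if PySem.List.pyGetD (PySem.List.pyGetD X_map x []) y 1 = 0 then some (x, y) else none)).length : Int) + 1) := by omega
        have h2 : (t + 1 - t - 1).toNat = 0 := by omega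
        simp [h1]
      · have ht' : t + 1 < i := by omega
        rw [ZtoX_inner]
        simp only [hz, if_true, hi, if_false, ih (t + 1) ht']
        simp only [List.filterMap_cons, hz, if_true, List.length_cons]
        have hidx : (i - t - 1).toNat = (i - (t + 1) - 1).toNat + 1 := by omega
        by_cases hle : i ≤ t + 1 + ((ys'.filterMap (fun y =>
            if PySem.List.pyGetD (PySem.List.pyGetD X_map x []) y 1 = 0 then some (x, y) else none)).length : Int)
        · have h3 : i ≤ t + (((ys'.filterMap (fun y =>
              if PySem.List.pyGetD (PySem.List.pyGetD X_map x []) y 1 = 0 then some (x, y) else none)).length : Int) + 1) := by omega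
          simp [hle, h3, hidx]
        · have h3 : ¬ i ≤ t + (((ys'.filterMap (fun y =>
              if PySem.List.pyGetD (PySem.List.pyGetD X_map x []) y 1 = 0 then some (x, y) else none)).length : Int) + 1) := by omega
          simp [hle, h3]
          omega
    · rw [ZtoX_inner]
      simp only [hz, if_false, ih t ht]
      simp only [List.filterMap_cons, hz, if_false]

lemma outer_spec (i : Int) (X_map : List (List Int)) (J_num : Int) :
    ∀ (xs : List Int) (t : Int), t < i →
      ZtoX_outer i X_map J_num xs t =
        (if i ≤ t + ((xs.flatMap (zRow X_map J_num)).length : Int)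
         then ((xs.flatMap (zRow X_map J_num))[(i - t - 1).toNat]?, i)
         else (none, t + ((xs.flatMap (zRow X_map J_num)).length : Int))) := by
  intro xs
  induction xs with
  | nil =>
    intro t ht
    simp [ZtoX_outer]
    omega
  | cons x xs' ih =>
    intro t ht
    rw [ZtoX_outer, inner_spec i X_map x _ t ht]
    rw [show ((PySem.List.pyRange 0 (J_num + 1) 1).filterMap (fun y =>
          if PySem.List.pyGetD (PySem.List.pyGetD X_map x []) y 1 = 0 then some (x, y) else none))
        = zRow X_map J_num x from rfl]
    simp only [List.flatMap_cons, List.length_append]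
    by_cases h1 : i ≤ t + ((zRow X_map J_num x).length : Int)
    · have hlt : (i - t - 1).toNat < (zRow X_map J_num x).length := by omega
      have hsome : (zRow X_map J_num x)[(i - t - 1).toNat]? =
          some ((zRow X_map J_num x)[(i - t - 1).toNat]'hlt) :=
        List.getElem?_eq_getElem hlt
      rw [if_pos h1, hsome]
      have h2 : i ≤ t + (((zRow X_map J_num x).length + (xs'.flatMap (zRow X_map J_num)).length : Nat) : Int) := by
        push_cast; omega
      rw [if_pos h2, List.getElem?_append_left hlt, hsome]
    · rw [if_neg h1]
      have ht' : t + ((zRow X_map J_num x).length : Int) < i := by omega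
      change ZtoX_outer i X_map J_num xs' (t + ((zRow X_map J_num x).length : Int)) = _
      rw [ih _ ht']
      have hidx : (i - (t + ((zRow X_map J_num x).length : Int)) - 1).toNat
          = (i - t - 1).toNat - (zRow X_map J_num x).length := by omega
      have hge : (zRow X_map J_num x).length ≤ (i - t - 1).toNat := by omega
      by_cases h3 : i ≤ t + ((zRow X_map J_num x).length : Int) +
          ((xs'.flatMap (zRow X_map J_num)).length : Int)
      · have h4 : i ≤ t + (((zRow X_map J_num x).length + (xs'.flatMap (zRow X_map J_num)).length : Nat) : Int) := by
          push_cast; omega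
        rw [if_pos (by omega : i ≤ t + ((zRow X_map J_num x).length : Int) + ((xs'.flatMap (zRow X_map J_num)).length : Int)), if_pos h4]
        rw [List.getElem?_append_right hge, hidx]
      · have h4 : ¬ i ≤ t + (((zRow X_map J_num x).length + (xs'.flatMap (zRow X_map J_num)).length : Nat) : Int) := by
          push_cast; ring_nf
          push_cast at h3 ⊢
          omega
        rw [if_neg h3, if_neg h4]
        have : t + ((zRow X_map J_num x).length : Int) + ((xs'.flatMap (zRow X_map J_num)).length : Int)
            = t + (((zRow X_map J_num x).length + (xs'.flatMap (zRow X_map J_num)).length : Nat) : Int) := by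
          push_cast; ring
        rw [this]

-- enumerate from start s + 1 shifts every zero position by one
lemma zeroPos_shift (l : List Int) : ∀ (s : Int),
    (PySem.List.enumerate l (s + 1)).filterMap (fun yv => if yv.2 = 0 then some yv.1 else none)
      = ((PySem.List.enumerate l s).filterMap (fun yv => if yv.2 = 0 then some yv.1 else none)).map (· + 1) := by
  induction l with
  | nil => intro s; simp [PySem.List.enumerate_nil]
  | cons a l ih =>
    intro s
    rw [PySem.List.enumerate_cons, PySem.List.enumerate_cons]
    by_cases ha : a = 0
    · simp [ha, ih (s + 1)]
    · simp [ha, ih (s + 1)]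

lemma zeroPos_length_aux (l : List Int) : ∀ (s : Int),
    ((PySem.List.enumerate l s).filterMap (fun yv => if yv.2 = 0 then some yv.1 else none)).length
      = l.count 0 := by
  induction l with
  | nil => intro s; simp [PySem.List.enumerate_nil]
  | cons a l ih =>
    intro s
    rw [PySem.List.enumerate_cons]
    by_cases ha : a = 0
    · simp [ha, ih (s + 1)]
    · simp [ha, ih (s + 1)]

lemma zeroPos_length (pfx : List Int) : (ZtoX_zeroPos pfx).length = pfx.count 0 :=
  zeroPos_length_aux pfx 0

-- pairing the found position with the fixed row index commutes with the search
lemma pairify (L : List Int) (p : Int → Prop) [DecidablePred p] (x : Int) :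
    L.filterMap (fun y => if p y then some (x, y) else none)
      = (L.filterMap (fun y => if p y then some y else none)).map (fun y => (x, y)) := by
  induction L with
  | nil => simp
  | cons a L ih =>
    by_cases ha : p a
    · simp [ha, ih]
    · simp [ha, ih]

-- A's per-row zero pairs are B's zero positions of the sliced row, paired with x
-- position-only core: A's scan of one row finds exactly the zero positions of the prefix
lemma core0 (l : List Int) : ∀ (W : Nat),
    (PySem.List.pyRange 0 (W : Int) 1).filterMap (fun y =>
        if PySem.List.pyGetD l y 1 = 0 then some y else none)
      = ZtoX_zeroPos (l.take W) := by
  induction l with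
  | nil =>
    intro W
    have : ∀ y : Int, PySem.List.pyGetD ([] : List Int) y 1 = 1 := by
      intro y; simp [PySem.List.pyGetD, PySem.List.pyGet?]
    simp [this, ZtoX_zeroPos, PySem.List.enumerate_nil]
  | cons a l ih =>
    intro W
    match W with
    | 0 => simp [PySem.List.pyRange_one_eq_nil, ZtoX_zeroPos, PySem.List.enumerate_nil]
    | Nat.succ W =>
      rw [PySem.List.pyRange_one_cons (by push_cast; omega)]
      rw [List.filterMap_cons]
      have hsh : PySem.List.pyRange 1 ((W.succ : Nat) : Int) 1
          = (PySem.List.pyRange 0 (W : Int) 1).map (fun y => y + 1) := by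
        rw [PySem.List.pyRange_one, PySem.List.pyRange_one]
        have h1 : (((W.succ : Nat) : Int) - 1).toNat = W := by push_cast; omega
        have h2 : (((W : Nat) : Int) - 0).toNat = W := by omega
        rw [h1, h2, List.map_map]
        refine List.map_congr_left ?_
        intro k _; simp; omega
      have htail : (PySem.List.pyRange 1 ((W.succ : Nat) : Int) 1).filterMap (fun y =>
            if PySem.List.pyGetD (a :: l) y 1 = 0 then some y else none)
          = ((PySem.List.pyRange 0 (W : Int) 1).filterMap (fun y =>
              if PySem.List.pyGetD l y 1 = 0 then some y else none)).map (fun y => y + 1) := by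
        rw [hsh, List.filterMap_map, List.map_filterMap]
        refine List.filterMap_congr ?_
        intro y hy
        have hy0 : 0 ≤ y := by
          rcases (PySem.List.mem_pyRange_one).1 hy with ⟨h, _⟩; omega
        have hstep : PySem.List.pyGetD (a :: l) (y + 1) 1 = PySem.List.pyGetD l y 1 := by
          have : y + 1 = ((y.toNat + 1 : Nat) : Int) := by omega
          rw [this, PySem.List.pyGetD_natCast]
          have : y = ((y.toNat : Nat) : Int) := by omega
          rw [this, PySem.List.pyGetD_natCast]
          simp [List.getD]
          rw [max_eq_left hy0]
        simp only [Function.comp]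
        by_cases hz : PySem.List.pyGetD l y 1 = 0
        · simp [hstep, hz]
        · simp [hstep, hz]
      have hz1 : ((PySem.List.enumerate (l.take W) ((0 : Int) + 1)).filterMap
            (fun yv => if yv.2 = 0 then some yv.1 else none))
          = (ZtoX_zeroPos (l.take W)).map (· + 1) := by
        have := zeroPos_shift (l.take W) 0
        simpa [ZtoX_zeroPos] using this
      have hget0 : PySem.List.pyGetD (a :: l) 0 1 = a := PySem.List.pyGetD_zero_cons a l 1
      rw [hget0, show ((0 : Int) + 1) = 1 from by norm_num, htail,
          List.take_succ_cons, ZtoX_zeroPos, PySem.List.enumerate_cons, List.filterMap_cons,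
          hz1]
      by_cases ha : a = 0
      · simp [ha, ih W, ZtoX_zeroPos]
      · simp [ha, ih W, ZtoX_zeroPos]

lemma zRow_eq_zeroPos (row : List Int) (J_num : Int) (x : Int) (hJ : 0 ≤ J_num) :
    (PySem.List.pyRange 0 (J_num + 1) 1).filterMap (fun y =>
        if PySem.List.pyGetD row y 1 = 0 then some (x, y) else none)
      = (ZtoX_zeroPos (PySem.List.slice row none (some (J_num + 1)))).map (fun y => (x, y)) := by
  rw [pairify, PySem.List.slice_to row (show (0:Int) ≤ J_num + 1 by omega)]
  have hW : (J_num + 1) = (((J_num + 1).toNat : Nat) : Int) := by omega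
  rw [hW, core0]
  rw [Int.toNat_natCast]

lemma altLoop_spec (J_num : Int) :
    ∀ (rows : List (Int × List Int)) (r : Int), 0 ≤ r →
      ZtoX_altLoop J_num rows r =
        (if r < ((altFlat J_num rows).length : Int)
         then ((altFlat J_num rows)[r.toNat]?).getD (0, 0) else (0, 0)) := by
  intro rows
  induction rows with
  | nil =>
    intro r h0
    rw [ZtoX_altLoop, altFlat]
    simp
    try omega
  | cons xr rs ih =>
    intro r h0
    obtain ⟨x, row⟩ := xr
    rw [ZtoX_altLoop, altFlat]
    set pfx := PySem.List.slice row none (some (J_num + 1)) with hpfx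
    set zp := ZtoX_zeroPos pfx with hzp
    have hc : (zp.length : Int) = (pfx.count 0 : Int) := by rw [hzp, zeroPos_length]
    set zs := zp.map (fun y => (x, y)) with hzs
    have hlz : zs.length = zp.length := List.length_map ..
    simp only [List.length_append]
    by_cases hr : r < (pfx.count 0 : Int)
    · rw [if_pos hr]
      have hrn : r.toNat < zp.length := by omega
      have hlt : r < ((zs.length + (altFlat J_num rs).length : Nat) : Int) := by
        push_cast; omega
      rw [if_pos hlt]
      rw [List.getElem?_append_left (by omega : r.toNat < zs.length)]
      rw [hzs, List.getElem?_map, List.getElem?_eq_getElem hrn]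
      rw [PySem.List.pyGet?_of_nonneg zp h0, List.getElem?_eq_getElem hrn]
      simp
    · rw [if_neg hr]
      have h0' : 0 ≤ r - (pfx.count 0 : Int) := by omega
      rw [ih _ h0']
      have hge : zs.length ≤ r.toNat := by omega
      have hidx : (r - (pfx.count 0 : Int)).toNat = r.toNat - zs.length := by omega
      by_cases h3 : r - (pfx.count 0 : Int) < ((altFlat J_num rs).length : Int)
      · have h4 : r < ((zs.length + (altFlat J_num rs).length : Nat) : Int) := by
          push_cast; omega
        rw [if_pos h3, if_pos h4, List.getElem?_append_right hge, hidx]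
      · have h4 : ¬ r < ((zs.length + (altFlat J_num rs).length : Nat) : Int) := by
          push_cast; omega
        rw [if_neg h3, if_neg h4]

-- a row index past the end of X_map contributes no zeros to A's scan
lemma zRow_oob (X_map : List (List Int)) (J_num : Int) (x : Int)
    (h : PySem.List.pyGetD X_map x ([] : List Int) = []) : zRow X_map J_num x = [] := by
  rw [zRow, h]
  rw [List.filterMap_eq_nil_iff]
  intro y _
  simp [PySem.List.pyGetD, PySem.List.pyGet?]

lemma flat_eq (X_map : List (List Int)) (J_num : Int) (hJ : 0 ≤ J_num) :
    ∀ (n : Nat) (s : Nat),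
      (PySem.List.pyRange (s : Int) ((s : Int) + (n : Int)) 1).flatMap (zRow X_map J_num)
        = altFlat J_num (PySem.List.enumerate ((X_map.drop s).take n) (s : Int)) := by
  intro n
  induction n with
  | zero =>
    intro s
    rw [PySem.List.pyRange_one_eq_nil (by omega)]
    simp [altFlat, PySem.List.enumerate_nil]
  | succ n ih =>
    intro s
    rw [PySem.List.pyRange_one_cons (by push_cast; omega), List.flatMap_cons]
    have harg : ((s : Int) + 1) = (((s + 1 : Nat) : Nat) : Int) := by push_cast; ring
    have harg2 : ((s : Int) + ((n + 1 : Nat) : Int)) = (((s + 1 : Nat) : Int) + (n : Int)) := by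
      push_cast; ring
    rw [harg, harg2, ih (s + 1)]
    cases hd : X_map.drop s with
    | nil =>
      have hlen : X_map.length ≤ s := by
        by_contra hc
        exact absurd hd (by simp [List.drop_eq_nil_iff]; omega)
      have hrow : PySem.List.pyGetD X_map (s : Int) ([] : List Int) = [] := by
        rw [PySem.List.pyGetD_natCast]
        exact List.getD_eq_default _ _ hlen
      have h2 : X_map.drop (s + 1) = [] := List.drop_eq_nil_of_le (by omega)
      rw [zRow_oob X_map J_num _ hrow, h2]
      simp [altFlat, PySem.List.enumerate_nil]
    | cons r M' =>
      have hs : s < X_map.length := by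
        by_contra hc
        rw [List.drop_eq_nil_of_le (by omega)] at hd
        exact absurd hd (by simp)
      have hr : X_map[s] = r := by
        have h0 : X_map[s + 0]? = some r := by rw [← List.getElem?_drop, hd]; simp
        have h1 : X_map[s]? = some r := by simpa using h0
        rw [List.getElem?_eq_getElem hs] at h1
        exact Option.some.inj h1
      have hrowD : PySem.List.pyGetD X_map (s : Int) ([] : List Int) = r := by
        rw [PySem.List.pyGetD_natCast, List.getD_eq_getElem _ _ hs, hr]
      have hM' : X_map.drop (s + 1) = M' := by
        have : X_map.drop (s + 1) = (X_map.drop s).drop 1 := by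
          rw [List.drop_drop]
        rw [this, hd]
        simp
      have hhead : zRow X_map J_num (s : Int)
          = (ZtoX_zeroPos (PySem.List.slice r none (some (J_num + 1)))).map
              (fun y => ((s : Int), y)) := by
        rw [zRow, hrowD]
        exact zRow_eq_zeroPos r J_num _ hJ
      rw [hhead, hM', List.take_succ_cons, PySem.List.enumerate_cons, altFlat]
      have : ((s : Int) + 1) = (((s + 1 : Nat) : Nat) : Int) := by push_cast; ring
      rw [this]

-- ===== VERDICT =====
theorem ZtoX_spec : Claim_equal_ZtoX := by
  intro i X_map S J_num _hdom hpre
  unfold Spec_ZtoX ZtoX ZtoX_alt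
  by_cases hi : i = -1
  · simp [hi]
  · unfold Pre_ZtoX at hpre
    obtain ⟨h0, hJ, x, hx, -, -, -⟩ := hpre.resolve_left hi
    have hS : 1 ≤ S := by omega
    have hneg : ¬ i < 0 := by omega
    simp only [hi, if_false, hneg]
    rw [outer_spec i X_map J_num _ (-1) (by omega)]
    have hslice : PySem.List.slice X_map none (some S) = X_map.take S.toNat :=
      PySem.List.slice_to X_map (by omega)
    have hbr := flat_eq X_map J_num hJ S.toNat 0
    rw [List.drop_zero] at hbr
    have hcast : (((0 : Nat) : Int) + ((S.toNat : Nat) : Int)) = S := by omega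
    have hcast0 : (((0 : Nat) : Int)) = (0 : Int) := by norm_num
    rw [hcast, hcast0] at hbr
    rw [hslice, altLoop_spec J_num _ i h0, ← hbr]
    set F := (PySem.List.pyRange 0 S 1).flatMap (zRow X_map J_num) with hF
    by_cases hle : i ≤ -1 + (F.length : Int)
    · rw [if_pos hle, if_pos (by omega : i < (F.length : Int))]
      have hidx : (i - (-1) - 1).toNat = i.toNat := by omega
      rw [hidx, List.getElem?_eq_getElem (by omega : i.toNat < F.length)]
      simp
    · rw [if_neg hle, if_neg (by omega : ¬ i < (F.length : Int))]
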